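-- pv_equiv track=rewrite | github.com/tra3600/Formula1 | circuit_convenable1.py | circuit_convenable1
-- ===== SOURCE A (Python) =====
-- def est_fermé1(c):
--     """
--     Détermine si le circuit est fermé.
--
--     Paramètres:
--     c (list of str): Liste représentant le circuit, contenant "A", "G" et "D".
--
--     Retourne:
--     bool: True si le circuit est fermé, False sinon.
--     """
--     x, y = 0, 0
--     direction = 0  # 0: Nord, 1: Est, 2: Sud, 3: Ouest
--     deltas = [(0, 1), (1, 0), (0, -1), (-1, 0)]
--
--     for e in c:
--         if e == "A":
--             dx, dy = deltas[direction]
--             x += dx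
--             y += dy
--         elif e == "G":
--             direction = (direction - 1) % 4
--         elif e == "D":
--             direction = (direction + 1) % 4
--
--     return (x, y) == (0, 0) and direction == 0
--
-- def contient_demi_tour1(c):
--     """
--     Vérifie si le circuit contient un demi-tour.
--
--     Paramètres:
--     c (list of str): Liste représentant le circuit, contenant "A", "G" et "D".
--
--     Retourne:
--     bool: True si le circuit contient un demi-tour, False sinon.
--     """
--     for i in range(len(c) - 1):
--         if (c[i] == "G" and c[i + 1] == "G") or (c[i] == "D" and c[i + 1] == "D"):
--             return True
--     return False
--
-- def circuit_convenable1(c):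
--     """
--     Détermine si le circuit est convenable.
--
--     Paramètres:
--     c (list of str): Liste représentant le circuit, contenant "A", "G" et "D".
--
--     Retourne:
--     bool: True si le circuit est fermé, ne contient pas de demi-tour et n'a pas de sections qui se superposent ou se croisent, False sinon.
--     """
--     if not est_fermé1(c):
--         return False
--
--     if contient_demi_tour1(c):
--         return False
--
--     x, y = 0, 0
--     direction = 0  # 0: Nord, 1: Est, 2: Sud, 3: Ouest
--     deltas = [(0, 1), (1, 0), (0, -1), (-1, 0)]
--     visited_positions = set()
--     visited_positions.add((x, y))
--
--     for e in c:
--         if e == "A":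
--             dx, dy = deltas[direction]
--             x += dx
--             y += dy
--             if (x, y) in visited_positions:
--                 return False
--             visited_positions.add((x, y))
--         elif e == "G":
--             direction = (direction - 1) % 4
--         elif e == "D":
--             direction = (direction + 1) % 4
--
--     return True
-- ===== SOURCE B (Python) =====
-- def circuit_convenable1(c):
--     # One fused pass: track position/direction, prev instruction for half-turns,
--     # and a visited set for self-intersections; combine the three flags at the end.
--     x, y = 0, 0
--     direction = 0
--     deltas = [(0, 1), (1, 0), (0, -1), (-1, 0)]
--     visited = set()
--     visited.add((0, 0))
--     prev = None
--     half_turn = False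
--     self_intersect = False
--     for e in c:
--         if e == "A":
--             dx, dy = deltas[direction]
--             x += dx
--             y += dy
--             if (x, y) in visited:
--                 self_intersect = True
--             visited.add((x, y))
--         elif e == "G":
--             if prev == "G":
--                 half_turn = True
--             direction = (direction - 1) % 4
--         elif e == "D":
--             if prev == "D":
--                 half_turn = True
--             direction = (direction + 1) % 4
--         prev = e
--     closed = (x, y) == (0, 0) and direction == 0
--     return closed and not half_turn and not self_intersect
-- ===== Notes on version B (the rewrite author's own statement) =====
-- stated objective: faster
-- what changed: Replaces A's three separate traversals (closure walk, index-based adjacent-pair scan, early-return intersection walk) with one fused pass that tracks position/direction, the previous instruction for half-turn detection, and a visited set for self-intersection, combining the three flags at the end.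
import Mathlib
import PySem

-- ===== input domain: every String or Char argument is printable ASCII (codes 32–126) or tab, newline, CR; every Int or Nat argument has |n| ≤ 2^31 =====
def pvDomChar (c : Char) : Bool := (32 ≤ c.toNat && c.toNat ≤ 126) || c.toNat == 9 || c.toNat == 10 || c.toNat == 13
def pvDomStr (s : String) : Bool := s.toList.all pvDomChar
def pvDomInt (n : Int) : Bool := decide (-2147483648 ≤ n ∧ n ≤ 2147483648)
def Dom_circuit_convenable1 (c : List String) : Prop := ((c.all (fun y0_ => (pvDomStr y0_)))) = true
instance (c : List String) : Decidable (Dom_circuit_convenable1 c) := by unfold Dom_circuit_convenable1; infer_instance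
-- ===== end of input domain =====

-- B fuses A's three traversals into one pass (prev-tracking for half-turns, a visited set
-- for intersections); the equivalence below is the full statement, nothing more is claimed.

-- ===== PORT A =====

-- deltas[direction]: direction is always kept in {0,1,2,3} by the `% 4` updates, so the
-- Option never misses; .getD (0,0) only totalises the lookup.
def pvDelta (d : Int) : Int × Int :=
  (PySem.List.pyGet? [((0:Int),(1:Int)), (1,0), (0,-1), (-1,0)] d).getD (0, 0)

-- est_fermé1: walk the circuit, return whether position and direction are back to start
def pvEstFerme1 (c : List String) : Bool :=
  let st := c.foldl (fun (st : (Int × Int) × Int) e =>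
      let ((x, y), d) := st
      if e = "A" then
        let (dx, dy) := pvDelta d
        ((x + dx, y + dy), d)
      else if e = "G" then ((x, y), PySem.Int.mod (d - 1) 4)
      else if e = "D" then ((x, y), PySem.Int.mod (d + 1) 4)
      else ((x, y), d))
    ((0, 0), 0)
  decide (st.1 = (0, 0)) && decide (st.2 = 0)

-- contient_demi_tour1: index loop with early return True = any over range(len(c)-1)
def pvContientDemiTour1 (c : List String) : Bool :=
  (PySem.List.pyRange 0 ((c.length : Int) - 1) 1).any (fun i =>
    (PySem.List.pyGet? c i == some "G" && PySem.List.pyGet? c (i + 1) == some "G") ||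
    (PySem.List.pyGet? c i == some "D" && PySem.List.pyGet? c (i + 1) == some "D"))

-- A's third loop: early `return False` on revisiting a position becomes structural recursion
def pvLoop3 : List String → Int → Int → Int → PySem.Set (Int × Int) → Bool
  | [], _, _, _, _ => true
  | e :: rest, x, y, d, vis =>
    if e = "A" then
      let (dx, dy) := pvDelta d
      let x' := x + dx
      let y' := y + dy
      if PySem.Set.contains vis (x', y') then false
      else pvLoop3 rest x' y' d (PySem.Set.add vis (x', y'))
    else if e = "G" then pvLoop3 rest x y (PySem.Int.mod (d - 1) 4) vis
    else if e = "D" then pvLoop3 rest x y (PySem.Int.mod (d + 1) 4) vis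
    else pvLoop3 rest x y d vis

def circuit_convenable1 (c : List String) : Bool :=
  if !pvEstFerme1 c then false
  else if pvContientDemiTour1 c then false
  else pvLoop3 c 0 0 0 (PySem.Set.add PySem.Set.empty (0, 0))

-- ===== PORT B =====

structure PvBSt where
  x : Int
  y : Int
  d : Int
  vis : PySem.Set (Int × Int)
  prev : Option String
  half : Bool
  inter : Bool

def pvStepB (s : PvBSt) (e : String) : PvBSt :=
  if e = "A" then
    let (dx, dy) := pvDelta s.d
    let x' := s.x + dx
    let y' := s.y + dy
    { s with x := x', y := y',
             inter := if PySem.Set.contains s.vis (x', y') then true else s.inter,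
             vis := PySem.Set.add s.vis (x', y'),
             prev := some e }
  else if e = "G" then
    { s with half := if s.prev = some "G" then true else s.half,
             d := PySem.Int.mod (s.d - 1) 4,
             prev := some e }
  else if e = "D" then
    { s with half := if s.prev = some "D" then true else s.half,
             d := PySem.Int.mod (s.d + 1) 4,
             prev := some e }
  else { s with prev := some e }

def circuit_convenable1_alt (c : List String) : Bool :=
  let s := c.foldl pvStepB
    { x := 0, y := 0, d := 0, vis := PySem.Set.add PySem.Set.empty (0, 0),
      prev := none, half := false, inter := false }
  (decide (s.x = 0) && decide (s.y = 0) && decide (s.d = 0)) && !s.half && !s.inter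

-- ===== PRECONDITION & SPEC =====
def Spec_circuit_convenable1 (c : List String) (out : Bool) : Prop := out = circuit_convenable1_alt c
instance (c : List String) (out : Bool) : Decidable (Spec_circuit_convenable1 c out) := by unfold Spec_circuit_convenable1; infer_instance

-- ===== CLAIM (what is proved, stated in full; the proofs are below) =====
def Claim_equal_circuit_convenable1 : Prop := ∀ (c : List String), Dom_circuit_convenable1 c → Spec_circuit_convenable1 c (circuit_convenable1 c)

-- ===== LEMMAS AND PROOFS =====

-- the (x,y,d) components of B's fold follow A's est_fermé walk, whatever the other fields are
theorem pvStepB_pos (l : List String) (s : PvBSt) :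
    (((l.foldl pvStepB s).x, (l.foldl pvStepB s).y), (l.foldl pvStepB s).d) =
      l.foldl (fun (st : (Int × Int) × Int) e =>
        let ((x, y), d) := st
        if e = "A" then
          let (dx, dy) := pvDelta d
          ((x + dx, y + dy), d)
        else if e = "G" then ((x, y), PySem.Int.mod (d - 1) 4)
        else if e = "D" then ((x, y), PySem.Int.mod (d + 1) 4)
        else ((x, y), d)) ((s.x, s.y), s.d) := by
  induction l generalizing s with
  | nil => rfl
  | cons e rest ih =>
    simp only [List.foldl_cons]
    rw [ih]
    unfold pvStepB
    split_ifs <;> rfl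

-- pairwise half-turn test, threaded through the previous instruction (none = loop not started)
def pvAdjAny : Option String → List String → Bool
  | _, [] => false
  | p, e :: r =>
    (((e = "G" : Bool) && (p = some "G" : Bool)) || ((e = "D" : Bool) && (p = some "D" : Bool)))
      || pvAdjAny (some e) r

-- the half flag of B's fold is its initial value or-ed with the prev-threaded pair scan
theorem pvStepB_half (l : List String) (s : PvBSt) :
    (l.foldl pvStepB s).half = (s.half || pvAdjAny s.prev l) := by
  induction l generalizing s with
  | nil => simp [pvAdjAny]
  | cons e rest ih =>
    simp only [List.foldl_cons, pvAdjAny]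
    rw [ih]
    unfold pvStepB
    split_ifs <;> simp_all

-- the index-based scan of A equals the prev-threaded scan starting from `none`
theorem pvDemiTour_eq_adjAny (c : List String) :
    pvContientDemiTour1 c = pvAdjAny none c := by
  have key : ∀ (l : List String) (p : String),
      (List.range l.length).any (fun k =>
        ((PySem.List.pyGet? (p :: l) (k : Int) == some "G" &&
          PySem.List.pyGet? (p :: l) ((k : Int) + 1) == some "G") ||
         (PySem.List.pyGet? (p :: l) (k : Int) == some "D" &&
          PySem.List.pyGet? (p :: l) ((k : Int) + 1) == some "D")))
      = pvAdjAny (some p) l := by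
    intro l
    induction l with
    | nil => intro p; simp [pvAdjAny]
    | cons e rest ih =>
      intro p
      simp only [List.length_cons]
      rw [List.range_succ_eq_map]
      simp only [List.any_cons, List.any_map, Function.comp_def]
      have tail : ((List.range rest.length).any (fun k =>
          ((PySem.List.pyGet? (p :: e :: rest) ((k + 1 : Nat) : Int) == some "G" &&
            PySem.List.pyGet? (p :: e :: rest) (((k + 1 : Nat) : Int) + 1) == some "G") ||
           (PySem.List.pyGet? (p :: e :: rest) ((k + 1 : Nat) : Int) == some "D" &&
            PySem.List.pyGet? (p :: e :: rest) (((k + 1 : Nat) : Int) + 1) == some "D"))))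
          = pvAdjAny (some e) rest := by
        rw [← ih e]
        refine List.any_congr rfl fun k => ?_
        have h2 : (((k + 1 : Nat) : Int) + 1) = ((k + 2 : Nat) : Int) := by push_cast; ring
        have h3 : ((k : Int) + 1) = ((k + 1 : Nat) : Int) := by push_cast; ring
        rw [h2, h3]
        simp only [PySem.List.pyGet?_natCast]
        simp [List.getElem?_cons_succ]
      rw [tail]
      have h0 : PySem.List.pyGet? (p :: e :: rest) ((0 : Nat) : Int) = some p := by
        simp
      have h1 : PySem.List.pyGet? (p :: e :: rest) (((0 : Nat) : Int) + 1) = some e := by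
        have h : (((0 : Nat) : Int) + 1) = ((1 : Nat) : Int) := by norm_num
        rw [h]; simp
      rw [h0, h1]
      have hstep : pvAdjAny (some p) (e :: rest) =
          ((((e = "G" : Bool) && ((some p : Option String) = some "G" : Bool)) ||
            ((e = "D" : Bool) && ((some p : Option String) = some "D" : Bool)))
            || pvAdjAny (some e) rest) := rfl
      rw [hstep]
      by_cases hG : e = "G" <;> by_cases hD : e = "D" <;> by_cases hpG : p = "G" <;>
        by_cases hpD : p = "D" <;> simp [hG, hD, hpG, hpD]
  unfold pvContientDemiTour1
  cases c with
  | nil =>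
    rw [PySem.List.pyRange_one_eq_nil (by norm_num)]
    simp [pvAdjAny]
  | cons p rest =>
    have hrange : PySem.List.pyRange 0 (((p :: rest).length : Int) - 1) 1
        = (List.range rest.length).map (fun (k : Nat) => (k : Int)) := by
      rw [PySem.List.pyRange_one]
      have h1 : ((((p :: rest).length : Int) - 1) - 0).toNat = rest.length := by
        simp
      rw [h1]
      simp only [zero_add]
    rw [hrange, List.any_map]
    have hfin := key rest p
    have hnone : pvAdjAny none (p :: rest) = pvAdjAny (some p) rest := by
      simp [pvAdjAny]
    rw [hnone, ← hfin]
    rfl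

-- once the intersection flag is set it stays set
theorem pvStepB_inter_mono (l : List String) (s : PvBSt) (h : s.inter = true) :
    (l.foldl pvStepB s).inter = true := by
  induction l generalizing s with
  | nil => exact h
  | cons e rest ih =>
    simp only [List.foldl_cons]
    apply ih
    unfold pvStepB
    split_ifs <;> simp_all

-- A's early-return intersection walk returns the negation of B's intersection flag
theorem pvLoop3_eq_not_inter (l : List String) (s : PvBSt) (h : s.inter = false) :
    pvLoop3 l s.x s.y s.d s.vis = !(l.foldl pvStepB s).inter := by
  induction l generalizing s with
  | nil => simp [pvLoop3, h]
  | cons e rest ih =>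
    simp only [List.foldl_cons]
    by_cases h1 : e = "A"
    · subst h1
      rcases hdel : pvDelta s.d with ⟨dx, dy⟩
      by_cases hc : (s.x + dx, s.y + dy) ∈ s.vis
      · have hm : (List.foldl pvStepB (pvStepB s "A") rest).inter = true := by
          apply pvStepB_inter_mono
          simp [pvStepB, hdel, hc]
        rw [hm]
        simp [pvLoop3, hdel, hc]
      · have hs' : (pvStepB s "A").inter = false := by
          simp [pvStepB, hdel, hc, h]
        have hrec := ih (pvStepB s "A") hs'
        simp [pvStepB, pvLoop3, hdel, hc, h] at hrec ⊢
        exact hrec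
    · have hL : pvLoop3 (e :: rest) s.x s.y s.d s.vis =
          pvLoop3 rest (pvStepB s e).x (pvStepB s e).y (pvStepB s e).d (pvStepB s e).vis := by
        by_cases h2 : e = "G" <;> by_cases h3 : e = "D" <;>
          simp [pvLoop3, pvStepB, h1, h2, h3]
      have hs' : (pvStepB s e).inter = false := by
        by_cases h2 : e = "G" <;> by_cases h3 : e = "D" <;>
          simp [pvStepB, h1, h2, h3, h]
      rw [hL, ih (pvStepB s e) hs']

-- ===== VERDICT (by name: the statement is the Claim_ definition above) =====
theorem circuit_convenable1_spec : Claim_equal_circuit_convenable1 := by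
  intro c _
  unfold Spec_circuit_convenable1 circuit_convenable1 circuit_convenable1_alt
  set s0 : PvBSt := { x := 0, y := 0, d := 0, vis := PySem.Set.add PySem.Set.empty (0, 0),
                      prev := none, half := false, inter := false } with hs0
  have hpos := pvStepB_pos c s0
  have hhalf := pvStepB_half c s0
  have hinter := pvLoop3_eq_not_inter c s0 (by simp [hs0])
  have hferme : pvEstFerme1 c =
      ((decide ((c.foldl pvStepB s0).x = 0) && decide ((c.foldl pvStepB s0).y = 0))
        && decide ((c.foldl pvStepB s0).d = 0)) := by
    unfold pvEstFerme1
    have : ((s0.x, s0.y), s0.d) = (((0 : Int), (0 : Int)), (0 : Int)) := by simp [hs0]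
    rw [← this, ← hpos]
    simp [Prod.ext_iff]
  have hdemi : pvContientDemiTour1 c = (c.foldl pvStepB s0).half := by
    rw [pvDemiTour_eq_adjAny, hhalf]
    simp [hs0]
  have hloop : pvLoop3 c 0 0 0 (PySem.Set.add PySem.Set.empty (0, 0)) =
      !(c.foldl pvStepB s0).inter := by
    rw [← hinter]
  rw [hferme, hdemi, hloop]
  by_cases hx : (List.foldl pvStepB s0 c).x = 0 <;>
  by_cases hy : (List.foldl pvStepB s0 c).y = 0 <;>
  by_cases hd : (List.foldl pvStepB s0 c).d = 0 <;>
  by_cases hh : (List.foldl pvStepB s0 c).half = true <;>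
  by_cases hi : (List.foldl pvStepB s0 c).inter = true <;>
    simp [hx, hy, hd, hh, hi]
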